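-- pv_equiv track=rewrite | github.com/andyscoffee/Study | 프로그래머스/코딩테스트입문/힙_더 맵게.py | solution
-- ===== SOURCE A (Python) =====
-- import heapq
--
-- def solution(scoville, K):
--     answer = 0
--     heapq.heapify(scoville)
--
--     while scoville[0] < K:
--         if len(scoville) <2:
--             return -1
--         least = heapq.heappop(scoville)
--         second = heapq.heappop(scoville)
--         mixed = least + (second * 2)
--         heapq.heappush(scoville, mixed)
--         answer += 1
--     if answer == 0:
--         return -1
--
--     return answer
-- ===== SOURCE B (Python) =====
-- def solution(scoville, K):
--     s = sorted(scoville)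
--     count = 0
--     while s[0] < K:
--         if len(s) < 2:
--             return -1
--         mixed = s[0] + 2 * s[1]
--         rest = s[2:]
--         i = 0
--         while i < len(rest) and rest[i] < mixed:
--             i += 1
--         rest.insert(i, mixed)
--         s = rest
--         count += 1
--     if count == 0:
--         return -1
--     return count
-- ===== Notes on version B (the rewrite author's own statement) =====
-- stated objective: idiomatic
-- what changed: Replaces the heapq binary heap with a sort-once sorted list: the two smallest are always the first two elements and the mixed value is re-inserted at its sorted position by a linear scan, keeping A's -1 sentinels (len<2 and zero mixes) unchanged.
import Mathlib
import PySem

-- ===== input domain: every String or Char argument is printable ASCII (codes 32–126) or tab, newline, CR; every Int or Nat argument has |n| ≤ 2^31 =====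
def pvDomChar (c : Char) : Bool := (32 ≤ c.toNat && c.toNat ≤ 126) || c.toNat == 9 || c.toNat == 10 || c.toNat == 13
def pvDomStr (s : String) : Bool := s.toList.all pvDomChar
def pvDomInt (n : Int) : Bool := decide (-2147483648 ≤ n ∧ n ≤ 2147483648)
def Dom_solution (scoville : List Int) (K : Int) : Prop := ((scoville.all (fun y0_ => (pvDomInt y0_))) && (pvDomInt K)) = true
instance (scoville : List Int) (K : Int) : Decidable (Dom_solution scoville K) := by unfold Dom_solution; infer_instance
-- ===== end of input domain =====

-- B replaces A's heapq binary heap by a sort-once sorted list with linear re-insertion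
-- (idiomatic, not faster); A mutates its argument in place (heapify/pops) while B does not:
-- the equivalence proved here is about the RETURN value only.

-- ===== PORT A =====
-- heapq is a library call: it is ported by its documented semantics — after heapify the
-- heap's first element is the minimum, heappop removes and returns the minimum (equal Ints
-- are indistinguishable, so which occurrence is removed cannot affect the return value),
-- heappush adds the element. Exact on the return value on every input.
-- The fuel only makes the while-loop total; solution passes fuel = scoville.length, which
-- is never exhausted (each iteration shortens the list by one and needs length ≥ 2).
def solutionGo (fuel : Nat) (l : List Int) (K : Int) (answer : Int) : Int :=
  match fuel with
  | 0 => 0  -- unreachable with fuel = initial length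
  | fuel' + 1 =>
    match PySem.List.min? l (fun x => x) with
    | none => 0  -- scoville[0] on the empty list raises IndexError; excluded by Pre_
    | some m =>
      if m < K then
        if l.length < 2 then -1
        else
          let l1 := l.erase m
          match PySem.List.min? l1 (fun x => x) with
          | none => 0  -- unreachable: l1 ≠ [] because l.length ≥ 2
          | some m2 => solutionGo fuel' ((l1.erase m2) ++ [m + m2 * 2]) K (answer + 1)
      else if answer == 0 then -1 else answer

def solution (scoville : List Int) (K : Int) : Int :=
  solutionGo scoville.length scoville K 0

-- ===== PORT B =====
-- rest.insert(i, mixed) after the linear scan 'while i < len(rest) and rest[i] < mixed'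
def insertLin (mixed : Int) (rest : List Int) : List Int :=
  match rest with
  | [] => [mixed]
  | x :: xs => if x < mixed then x :: insertLin mixed xs else mixed :: x :: xs

-- fuel only makes the while-loop total; solution_alt passes the initial length, never exhausted
def solutionAltGo (fuel : Nat) (s : List Int) (K : Int) (count : Int) : Int :=
  match fuel with
  | 0 => 0  -- unreachable with fuel = initial length
  | fuel' + 1 =>
    match s with
    | [] => 0  -- s[0] raises IndexError; excluded by Pre_
    | x :: xs =>
      if x < K then
        match xs with
        | [] => -1
        | y :: ys => solutionAltGo fuel' (insertLin (x + 2 * y) ys) K (count + 1)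
      else if count == 0 then -1 else count

def solution_alt (scoville : List Int) (K : Int) : Int :=
  solutionAltGo scoville.length (PySem.List.sorted scoville (fun x => x) false) K 0

-- ===== PRECONDITION & SPEC =====
-- Pre_ excludes only the empty list, on which both A and B raise IndexError (scoville[0]).
def Pre_solution (scoville : List Int) (K : Int) : Prop := scoville ≠ []
instance (scoville : List Int) (K : Int) : Decidable (Pre_solution scoville K) := by
  unfold Pre_solution; infer_instance

def pvWitness_solution : List Int × Int := ([1, 2, 3, 9, 10, 12], 7)

def Spec_solution (scoville : List Int) (K : Int) (out : Int) : Prop :=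
  out = solution_alt scoville K
instance (scoville : List Int) (K : Int) (out : Int) : Decidable (Spec_solution scoville K out) := by
  unfold Spec_solution; infer_instance

-- ===== CLAIM (what is proved, stated in full; the proofs are below) =====
def Claim_equal_solution : Prop := ∀ (scoville : List Int) (K : Int),
  Dom_solution scoville K → Pre_solution scoville K → Spec_solution scoville K (solution scoville K)

-- ===== LEMMAS AND PROOFS =====

theorem insertLin_perm (v : Int) (ys : List Int) : (insertLin v ys).Perm (v :: ys) := by
  induction ys with
  | nil => simp [insertLin]
  | cons x xs ih =>
    simp only [insertLin]
    split
    · exact ((ih.cons x).trans (List.Perm.swap v x xs))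
    · exact List.Perm.refl _

theorem insertLin_pairwise (v : Int) (ys : List Int) (h : ys.Pairwise (· ≤ ·)) :
    (insertLin v ys).Pairwise (· ≤ ·) := by
  induction ys with
  | nil => simp [insertLin]
  | cons x xs ih =>
    rcases List.pairwise_cons.mp h with ⟨hx, hxs⟩
    simp only [insertLin]
    split
    · rename_i hlt
      refine List.pairwise_cons.mpr ⟨?_, ih hxs⟩
      intro z hz
      have hz' : z = v ∨ z ∈ xs := by
        have := (insertLin_perm v xs).mem_iff.mp hz
        simpa using this
      rcases hz' with rfl | hz'
      · exact le_of_lt hlt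
      · exact hx z hz'
    · rename_i hge
      refine List.pairwise_cons.mpr ⟨?_, h⟩
      intro z hz
      rcases List.mem_cons.mp hz with rfl | hz'
      · omega
      · exact le_trans (by omega) (hx z hz')

-- the minimum of any rearrangement of a ≤-sorted nonempty list is its head
theorem min?_eq_head (l : List Int) (x : Int) (xs : List Int)
    (hp : l.Perm (x :: xs)) (hs : (x :: xs).Pairwise (· ≤ ·)) :
    PySem.List.min? l (fun z => z) = some x := by
  have hne : l ≠ [] := by
    intro h; subst h; exact (List.cons_ne_nil x xs) hp.nil_eq.symm
  cases hm : PySem.List.min? l (fun z => z) with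
  | none => exact absurd ((PySem.List.min?_eq_none_iff _ _).mp hm) hne
  | some m =>
    have hmem : m ∈ l := PySem.List.min?_mem hm
    have hmin : ∀ y ∈ l, m ≤ y := by
      intro y hy; exact PySem.List.min?_isMin hm y hy
    have hxl : x ∈ l := hp.mem_iff.mpr (List.mem_cons_self)
    have hmx : m ≤ x := hmin x hxl
    have hxm : x ≤ m := by
      have : m ∈ x :: xs := hp.mem_iff.mp hmem
      rcases List.mem_cons.mp this with rfl | hmxs
      · exact le_refl _
      · exact (List.pairwise_cons.mp hs).1 m hmxs
    have : m = x := le_antisymm hmx hxm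
    rw [this]

-- main loop correspondence: A's heap loop and B's sorted-list loop return the same value
theorem go_eq (fuel : Nat) : ∀ (fuel' : Nat) (l s : List Int) (K a : Int),
    l.length ≤ fuel → s.length ≤ fuel' → l.Perm s → s.Pairwise (· ≤ ·) →
    solutionGo fuel l K a = solutionAltGo fuel' s K a := by
  induction fuel with
  | zero =>
    intro fuel' l s K a hf hf' hp _
    have hl : l = [] := List.length_eq_zero_iff.mp (Nat.le_zero.mp hf)
    subst hl
    have hs : s = [] := hp.nil_eq.symm
    subst hs
    cases fuel' <;> simp [solutionGo, solutionAltGo]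
  | succ n ih =>
    intro fuel' l s K a hf hf' hp hsort
    cases s with
    | nil =>
      have hl : l = [] := hp.eq_nil
      subst hl
      cases fuel' <;> simp [solutionGo, solutionAltGo, PySem.List.min?]
    | cons x xs =>
      have hlen : l.length = xs.length + 1 := by simpa using hp.length_eq
      have hf'pos : 1 ≤ fuel' := by
        have : xs.length + 1 ≤ fuel' := by simpa using hf'
        omega
      obtain ⟨f2, rfl⟩ : ∃ f2, fuel' = f2 + 1 := ⟨fuel' - 1, by omega⟩
      have hmin : PySem.List.min? l (fun z => z) = some x := min?_eq_head l x xs hp hsort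
      simp only [solutionGo, solutionAltGo, hmin]
      by_cases hxK : x < K
      · simp only [if_pos hxK]
        cases xs with
        | nil =>
          have : l.length < 2 := by simp at hlen; omega
          simp [this]
        | cons y ys =>
          have hlen2 : ¬ l.length < 2 := by simp at hlen; omega
          simp only [if_neg hlen2]
          -- first pop
          have hp1 : (l.erase x).Perm (y :: ys) := by
            have := hp.erase x
            simpa using this
          have hsort1 : (y :: ys).Pairwise (· ≤ ·) :=
            (List.pairwise_cons.mp hsort).2
          have hmin2 : PySem.List.min? (l.erase x) (fun z => z) = some y :=
            min?_eq_head (l.erase x) y ys hp1 hsort1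
          simp only [hmin2]
          -- second pop and push; relate the two new states
          have hp2 : ((l.erase x).erase y).Perm ys := by
            have := hp1.erase y
            simpa using this
          have hpnew : (((l.erase x).erase y) ++ [x + y * 2]).Perm (insertLin (x + 2 * y) ys) := by
            have h1 : (((l.erase x).erase y) ++ [x + y * 2]).Perm (ys ++ [x + y * 2]) :=
              hp2.append (List.Perm.refl _)
            have h2 : (ys ++ [x + y * 2]).Perm ((x + 2 * y) :: ys) := by
              have : x + y * 2 = x + 2 * y := by ring
              rw [this]
              exact List.perm_append_singleton _ _
            exact (h1.trans h2).trans (insertLin_perm _ _).symm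
          have hsnew : (insertLin (x + 2 * y) ys).Pairwise (· ≤ ·) :=
            insertLin_pairwise _ _ (List.pairwise_cons.mp hsort1).2
          apply ih f2 _ _ K (a + 1)
          · -- length bound for A's new state
            have hx : x ∈ l := hp.mem_iff.mpr List.mem_cons_self
            have hy : y ∈ l.erase x := hp1.mem_iff.mpr List.mem_cons_self
            have e1 : (l.erase x).length = l.length - 1 := List.length_erase_of_mem hx
            have e2 : ((l.erase x).erase y).length = (l.erase x).length - 1 :=
              List.length_erase_of_mem hy
            simp only [List.length_append, List.length_cons, List.length_nil, e2, e1]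
            simp at hlen; omega
          · -- length bound for B's new state
            have : (insertLin (x + 2 * y) ys).length = ys.length + 1 := by
              simpa using (insertLin_perm (x + 2 * y) ys).length_eq
            simp at hf'; omega
          · exact hpnew
          · exact hsnew
      · simp [if_neg hxK]

-- ===== VERDICT (by name: the statement is the Claim_ definition above) =====
theorem solution_spec : Claim_equal_solution := by
  intro scoville K _ _
  unfold Spec_solution solution solution_alt
  exact go_eq scoville.length scoville.length scoville
    (PySem.List.sorted scoville (fun x => x) false) K 0
    (le_refl _)
    (by rw [PySem.List.length_sorted])
    (PySem.List.sorted_perm _ _ _).symm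
    (by simpa using PySem.List.sorted_pairwise (xs := scoville) (key := fun x => x))
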